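-- pv_equiv track=rewrite | github.com/WargaLab-Information-Systems/algoritma-pemrograman-1C-2025 | modul-6/250441100069-MUHAMMAD MAULANA RAMADHAN/TUGAS PRATIKUM NO 3.py | validasi_angka
-- ===== SOURCE A (Python) =====
-- def validasi_angka(teks):
--     if teks == "":
--         return (False, 0)
--
--     negatif = False
--     if teks[0] == "-":
--         negatif = True
--         teks = teks[1:]
--
--     if teks == "":
--         return (False, 0)
--
--     nilai = 0
--     for t in teks:
--         if t < "0" or t > "9":
--             return (False, 0)
--         nilai = nilai * 10 + (ord(t) - ord("0"))
--
--     if negatif: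
--         nilai = -nilai
--
--     return (True, nilai)
-- ===== SOURCE B (Python) =====
-- def validasi_angka(teks):
--     neg = teks.startswith("-")
--     body = teks[1:] if neg else teks
--     if not body or not all("0" <= c <= "9" for c in body):
--         return (False, 0)
--     mag = 0
--     pw = 1
--     for c in reversed(body):
--         mag += (ord(c) - 48) * pw
--         pw *= 10
--     return (True, -mag if neg else mag)
-- ===== Notes on version B (the rewrite author's own statement) =====
-- stated objective: alternative
-- what changed: A runs one forward Horner-accumulator loop with early return on the first bad character; B first validates the whole body with all(), then converts back-to-front summing digit*power-of-10 positional weights.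
import Mathlib
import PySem

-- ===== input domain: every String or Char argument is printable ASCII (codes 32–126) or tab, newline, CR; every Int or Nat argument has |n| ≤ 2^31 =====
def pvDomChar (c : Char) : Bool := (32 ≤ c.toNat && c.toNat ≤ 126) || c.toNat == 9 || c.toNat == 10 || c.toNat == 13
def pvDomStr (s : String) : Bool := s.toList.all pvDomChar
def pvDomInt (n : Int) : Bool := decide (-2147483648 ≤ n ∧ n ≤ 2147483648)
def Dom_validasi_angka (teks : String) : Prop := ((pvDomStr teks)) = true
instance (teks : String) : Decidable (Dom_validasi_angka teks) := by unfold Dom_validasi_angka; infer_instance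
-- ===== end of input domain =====

-- B replaces A's single forward Horner loop (early return on a bad character) by a
-- whole-string digit validation followed by a back-to-front positional-weight conversion
-- (objective: alternative decomposition, same O(n) cost).

-- ===== PORT A =====
-- the 'for t in teks' loop: early 'return (False, 0)' modelled as none
def vaLoop (nilai : Int) : List Char → Option Int
  | [] => some nilai
  | t :: rest =>
    if t < '0' || t > '9' then none
    else vaLoop (nilai * 10 + ((t.toNat : Int) - 48)) rest

def validasi_angka (teks : String) : Bool × Int :=
  match teks.toList with
  | [] => (false, 0)
  | c :: rest =>
    let negatif := c = '-'
    let cs := if negatif then rest else c :: rest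
    if cs = [] then (false, 0)
    else
      match vaLoop 0 cs with
      | none => (false, 0)
      | some nilai => (true, if negatif then -nilai else nilai)

-- ===== PORT B =====
def isDigB (c : Char) : Bool := decide ('0' ≤ c) && decide (c ≤ '9')

-- the 'for c in reversed(body)' loop carrying (mag, pw)
def convB (cs : List Char) : Int × Int :=
  cs.reverse.foldl (fun s c => (s.1 + ((c.toNat : Int) - 48) * s.2, s.2 * 10)) (0, 1)

def validasi_angka_alt (teks : String) : Bool × Int :=
  let l := teks.toList
  let neg := l.head? = some '-'
  let body := if neg then l.tail else l
  if !body.isEmpty && body.all isDigB then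
    (true, if neg then -(convB body).1 else (convB body).1)
  else (false, 0)

-- ===== PRECONDITION & SPEC =====
def Spec_validasi_angka (teks : String) (out : Bool × Int) : Prop := out = validasi_angka_alt teks
instance (teks : String) (out : Bool × Int) : Decidable (Spec_validasi_angka teks out) := by unfold Spec_validasi_angka; infer_instance

-- ===== CLAIM (what is proved, stated in full; the proofs are below) =====
def Claim_equal_validasi_angka : Prop := ∀ (teks : String), Dom_validasi_angka teks → Spec_validasi_angka teks (validasi_angka teks)

-- ===== LEMMAS AND PROOFS =====

-- if some character is not a digit, A's loop bails out
theorem vaLoop_none (cs : List Char) (h : cs.all isDigB = false) (a : Int) :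
    vaLoop a cs = none := by
  induction cs generalizing a with
  | nil => simp at h
  | cons c rest ih =>
    simp only [List.all_cons, Bool.and_eq_false_iff] at h
    by_cases hc : (c < '0' || c > '9') = true
    · simp [vaLoop, hc]
    · have hd : isDigB c = true := by
        simp only [Bool.or_eq_true, decide_eq_true_eq, not_or] at hc
        simp [isDigB, le_of_not_gt hc.1, le_of_not_gt hc.2]
      rcases h with h | h
      · rw [hd] at h; exact absurd h (by simp)
      · simpa [vaLoop, hc] using ih h _

-- if every character is a digit, A's loop is the plain Horner fold
theorem vaLoop_all (cs : List Char) (h : cs.all isDigB = true) (a : Int) :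
    vaLoop a cs = some (cs.foldl (fun n c => n * 10 + ((c.toNat : Int) - 48)) a) := by
  induction cs generalizing a with
  | nil => simp [vaLoop]
  | cons c rest ih =>
    simp only [List.all_cons, Bool.and_eq_true] at h
    have hc : (c < '0' || c > '9') = false := by
      have hd := h.1
      simp only [isDigB, Bool.and_eq_true, decide_eq_true_eq] at hd
      simp [not_lt_of_ge hd.1, not_lt_of_ge hd.2]
    simp [vaLoop, hc, List.foldl_cons, ih h.2]

-- B's reversed loop computes (Horner value, 10^length)
theorem convB_spec (cs : List Char) :
    convB cs = (cs.foldl (fun n c => n * 10 + ((c.toNat : Int) - 48)) 0, (10 : Int) ^ cs.length) := by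
  suffices h : ∀ a : Int,
      (cs.foldl (fun n c => n * 10 + ((c.toNat : Int) - 48)) a)
        = a * (10 : Int) ^ cs.length + (convB cs).1 ∧ (convB cs).2 = (10 : Int) ^ cs.length by
    have := h 0
    have h2 := this.2
    refine Prod.ext ?_ h2
    simpa using (this.1).symm
  induction cs with
  | nil => intro a; simp [convB]
  | cons c rest ih =>
    intro a
    have hrev : (c :: rest).reverse = rest.reverse ++ [c] := by simp
    have hstep : convB (c :: rest)
        = ((convB rest).1 + ((c.toNat : Int) - 48) * (convB rest).2, (convB rest).2 * 10) := by
      simp [convB, hrev, List.foldl_append]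
    rcases ih (a * 10 + ((c.toNat : Int) - 48)) with ⟨h1, h2⟩
    constructor
    · simp only [List.foldl_cons, hstep, List.length_cons]
      rw [h1, h2]; ring
    · simp only [hstep, List.length_cons]
      rw [h2]; ring

-- ===== VERDICT (by name: the statement is the Claim_ definition above) =====
theorem validasi_angka_spec : Claim_equal_validasi_angka := by
  intro teks _
  unfold Spec_validasi_angka validasi_angka validasi_angka_alt
  cases h : teks.toList with
  | nil => simp
  | cons c rest =>
    by_cases hneg : c = '-'
    · subst hneg
      cases rest with
      | nil => simp
      | cons d ds =>
        by_cases hall : (d :: ds).all isDigB = true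
        · simp [vaLoop_all _ hall, convB_spec, hall]
        · have hn := vaLoop_none _ (Bool.eq_false_iff.mpr hall)
          simp only [Bool.not_eq_true] at hall
          simp [hn 0, hall]
    · by_cases hall : (c :: rest).all isDigB = true
      · have hc : isDigB c = true := by
          simp only [List.all_cons, Bool.and_eq_true] at hall; exact hall.1
        have hcn : c ≠ '-' := hneg
        simp [vaLoop_all _ hall, convB_spec, hall, hneg]
      · have hn := vaLoop_none _ (Bool.eq_false_iff.mpr hall)
        simp only [Bool.not_eq_true] at hall
        simp [hn 0, hall, hneg]
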